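-- pv_equiv track=rewrite | github.com/neha39/Algorithms-in-Python | fibonacci_sum_squares.py | fibonacci_sum_squares
-- ===== SOURCE A (Python) =====
-- def fibonacci_sum_squares(n):
--     if n <= 1:
--         return n
--
--     fib_list = [0, 1]
--
--     while True:
--         fib_list.append((fib_list[-2] + fib_list[-1]) % 10)
--         if fib_list[-2] == 0 and fib_list[-1] == 1:
--             temp1 = fib_list[(n % (len(fib_list) - 2))]
--             temp2 = fib_list[(n % (len(fib_list) - 2)) - 1]
--             return  (temp1 * (temp1 + temp2)) % 10
-- ===== SOURCE B (Python) =====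
-- def fibonacci_sum_squares(n):
--     if n <= 1:
--         return n
--     # sum of F_i^2 (mod 10) for i = 0..n, accumulated directly; the whole
--     # state (a, b, s) mod 10 is periodic with period 60, so n+1 steps give
--     # the same result as (n % 60) + 1 steps.
--     a, b, s = 0, 1, 0
--     for _ in range(n % 60 + 1):
--         s = (s + a * a) % 10
--         a, b = b, (a + b) % 10
--     return s
-- ===== Notes on version B (the rewrite author's own statement) =====
-- stated objective: simpler
-- what changed: B accumulates the squared Fibonacci terms mod 10 in a direct three-variable loop (run n%60+1 times since the accumulator state has period 60), instead of A's building a Pisano-period table and applying the F(n)*F(n+1) identity with list indexing.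
import Mathlib
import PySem

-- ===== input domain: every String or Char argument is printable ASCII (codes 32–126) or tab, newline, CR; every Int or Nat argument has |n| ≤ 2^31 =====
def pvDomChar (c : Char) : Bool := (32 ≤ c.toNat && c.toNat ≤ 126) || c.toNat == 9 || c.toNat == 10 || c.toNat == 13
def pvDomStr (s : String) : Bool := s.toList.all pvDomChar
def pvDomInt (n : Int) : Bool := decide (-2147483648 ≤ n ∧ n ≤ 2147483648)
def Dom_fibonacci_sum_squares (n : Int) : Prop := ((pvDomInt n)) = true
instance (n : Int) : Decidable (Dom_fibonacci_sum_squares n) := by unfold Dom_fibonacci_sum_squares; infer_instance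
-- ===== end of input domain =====

-- B replaces A's Pisano-table + F(n)*F(n+1)-identity computation by a direct loop
-- accumulating the squared Fibonacci terms mod 10 (run n%60+1 times); simpler, same cost.

-- ===== PORT A =====
-- the 'while True' loop of A; fuel 100 only makes it total (the loop provably
-- terminates after 60 appends, so the 0-fuel branch is never reached)
def fibLoopA (n : Int) (fib : List Int) : Nat → Int
  | 0 => 0
  | fuel + 1 =>
    let fib := fib ++ [PySem.Int.mod ((PySem.List.pyGet? fib (-2)).getD 0 + (PySem.List.pyGet? fib (-1)).getD 0) 10]
    if (PySem.List.pyGet? fib (-2)).getD 0 = 0 ∧ (PySem.List.pyGet? fib (-1)).getD 0 = 1 then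
      let t1 := (PySem.List.pyGet? fib (PySem.Int.mod n ((fib.length : Int) - 2))).getD 0
      let t2 := (PySem.List.pyGet? fib (PySem.Int.mod n ((fib.length : Int) - 2) - 1)).getD 0
      PySem.Int.mod (t1 * (t1 + t2)) 10
    else fibLoopA n fib fuel

def fibonacci_sum_squares (n : Int) : Int :=
  if n ≤ 1 then n
  else fibLoopA n [0, 1] 100

-- ===== PORT B =====
def fibonacci_sum_squares_alt (n : Int) : Int :=
  if n ≤ 1 then n
  else
    let st := (PySem.List.pyRange 0 (PySem.Int.mod n 60 + 1) 1).foldl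
      (fun (st : Int × Int × Int) _ =>
        (st.2.1, PySem.Int.mod (st.1 + st.2.1) 10, PySem.Int.mod (st.2.2 + st.1 * st.1) 10))
      (0, 1, 0)
    st.2.2

-- ===== PRECONDITION & SPEC =====
def Spec_fibonacci_sum_squares (n : Int) (out : Int) : Prop := out = fibonacci_sum_squares_alt n
instance (n : Int) (out : Int) : Decidable (Spec_fibonacci_sum_squares n out) := by unfold Spec_fibonacci_sum_squares; infer_instance

-- ===== CLAIM (what is proved, stated in full; the proofs are below) =====
def Claim_equal_fibonacci_sum_squares : Prop := ∀ (n : Int), Dom_fibonacci_sum_squares n → Spec_fibonacci_sum_squares n (fibonacci_sum_squares n)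

-- ===== LEMMAS AND PROOFS =====

-- the list A has built when its loop terminates (F_0 .. F_61 mod 10)
def pvTableA : List Int :=
  [0, 1, 1, 2, 3, 5, 8, 3, 1, 4, 5, 9, 4, 3, 7, 0, 7, 7, 4, 1, 5, 6, 1, 7, 8, 5, 3, 8, 1, 9,
   0, 9, 9, 8, 7, 5, 2, 7, 9, 6, 5, 1, 6, 7, 3, 0, 3, 3, 6, 9, 5, 4, 9, 3, 2, 5, 7, 2, 9, 1, 0, 1]

-- A's answer as a function of m = n % 60
def pvAOf (m : Int) : Int :=
  let t1 := (PySem.List.pyGet? pvTableA m).getD 0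
  let t2 := (PySem.List.pyGet? pvTableA (m - 1)).getD 0
  PySem.Int.mod (t1 * (t1 + t2)) 10

-- B's answer as a function of m = n % 60
def pvBOf (m : Int) : Int :=
  ((PySem.List.pyRange 0 (m + 1) 1).foldl
    (fun (st : Int × Int × Int) _ =>
      (st.2.1, PySem.Int.mod (st.1 + st.2.1) 10, PySem.Int.mod (st.2.2 + st.1 * st.1) 10))
    (0, 1, 0)).2.2

set_option maxRecDepth 8192 in
lemma fibLoopA_eval (n : Int) : fibLoopA n [0, 1] 100 = pvAOf (PySem.Int.mod n 60) := rfl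

lemma pv_key : ∀ k : Fin 60, pvAOf (k : Int) = pvBOf (k : Int) := by decide

-- ===== VERDICT (by name: the statement is the Claim_ definition above) =====
theorem fibonacci_sum_squares_spec : Claim_equal_fibonacci_sum_squares := by
  intro n _
  unfold Spec_fibonacci_sum_squares fibonacci_sum_squares fibonacci_sum_squares_alt
  by_cases h : n ≤ 1
  · simp [h]
  · rw [if_neg h, if_neg h, fibLoopA_eval]
    have h0 : (0 : Int) < 60 := by norm_num
    have hge : 0 ≤ PySem.Int.mod n 60 := PySem.Int.mod_nonneg n h0
    have hlt : PySem.Int.mod n 60 < 60 := PySem.Int.mod_lt n h0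
    have hk : ((PySem.Int.mod n 60).toNat : Int) = PySem.Int.mod n 60 := Int.toNat_of_nonneg hge
    have := pv_key ⟨(PySem.Int.mod n 60).toNat, by omega⟩
    simp only [hk] at this
    rw [show (((PySem.List.pyRange 0 (PySem.Int.mod n 60 + 1) 1).foldl
      (fun (st : Int × Int × Int) _ =>
        (st.2.1, PySem.Int.mod (st.1 + st.2.1) 10, PySem.Int.mod (st.2.2 + st.1 * st.1) 10))
      (0, 1, 0)).2.2 = pvBOf (PySem.Int.mod n 60)) from rfl]
    exact this
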